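-- pv_equiv track=rewrite | github.com/Maninsalsa/bad_code | quizzes/python_quizzes/_code_academy_python/data_parse_cleanse/raw_to_string.py | strip_specific_indices
-- ===== SOURCE A (Python) =====
-- def strip_specific_indices(strings, indices=None):
--     """Strip whitespace from specific indices in a list."""
--     if indices is None:
--         return strings
--
--     stripped_list = strings.copy()
--     for index in indices:
--         if 0 <= index < len(stripped_list):
--             stripped_list[index] = stripped_list[index].strip()
--     return stripped_list
-- ===== SOURCE B (Python) =====
-- def strip_specific_indices(strings, indices=None):
--     """Strip whitespace from specific indices in a list."""
--     if indices is None: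
--         return strings
--     idx = set(indices)
--     return [s.strip() if i in idx else s for i, s in enumerate(strings)]
-- ===== Notes on version B (the rewrite author's own statement) =====
-- stated objective: idiomatic
-- what changed: Replaces the copy-then-mutate loop over the indices list with a single comprehension pass over the strings using a prebuilt index set; duplicate indices are harmless by strip's idempotence and out-of-range indices never match an enumerate position.
import Mathlib
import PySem

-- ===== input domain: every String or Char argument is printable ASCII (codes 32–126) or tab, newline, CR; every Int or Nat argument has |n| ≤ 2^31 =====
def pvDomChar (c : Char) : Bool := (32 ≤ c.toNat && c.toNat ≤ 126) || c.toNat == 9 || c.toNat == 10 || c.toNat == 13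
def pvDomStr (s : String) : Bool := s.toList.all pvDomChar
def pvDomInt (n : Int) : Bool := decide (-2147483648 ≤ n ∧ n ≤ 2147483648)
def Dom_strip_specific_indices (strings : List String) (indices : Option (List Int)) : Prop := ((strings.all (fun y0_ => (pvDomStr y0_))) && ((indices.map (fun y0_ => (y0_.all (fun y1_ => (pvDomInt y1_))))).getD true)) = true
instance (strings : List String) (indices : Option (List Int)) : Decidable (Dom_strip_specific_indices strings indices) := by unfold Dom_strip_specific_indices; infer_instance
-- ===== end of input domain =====

-- B replaces A's copy-then-mutate loop over the indices with one pass over the strings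
-- guarded by a prebuilt index set (idiomatic; same asymptotic cost).


-- ===== PORT A =====
-- one loop step: 'if 0 <= index < len(stripped_list): stripped_list[index] = stripped_list[index].strip()'
def pvStepA (acc : List String) (index : Int) : List String :=
  if 0 ≤ index ∧ index < PySem.List.len acc then
    PySem.List.pySetD acc index (PySem.Str.strip (PySem.List.pyGetD acc index ""))
  else acc

def strip_specific_indices (strings : List String) (indices : Option (List Int)) : List String :=
  match indices with
  | none => strings
  | some idxs => idxs.foldl pvStepA strings

-- ===== PORT B =====
def strip_specific_indices_alt (strings : List String) (indices : Option (List Int)) : List String :=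
  match indices with
  | none => strings
  | some idxs =>
    let idx : PySem.Set Int := PySem.Set.ofList idxs
    (PySem.List.enumerate strings 0).map
      (fun p => if PySem.Set.contains idx p.1 then PySem.Str.strip p.2 else p.2)

-- ===== PRECONDITION & SPEC =====
def Spec_strip_specific_indices (strings : List String) (indices : Option (List Int)) (out : List String) : Prop := out = strip_specific_indices_alt strings indices
instance (strings : List String) (indices : Option (List Int)) (out : List String) : Decidable (Spec_strip_specific_indices strings indices out) := by unfold Spec_strip_specific_indices; infer_instance

-- ===== CLAIM (what is proved, stated in full; the proofs are below) =====
def Claim_equal_strip_specific_indices : Prop := ∀ (strings : List String) (indices : Option (List Int)), Dom_strip_specific_indices strings indices → Spec_strip_specific_indices strings indices (strip_specific_indices strings indices)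

-- ===== LEMMAS AND PROOFS =====

-- "apply strip exactly at the positions f selects" — the common shape of both ports' results
def pvMark (f : Int → Bool) (xs : List String) : List String :=
  (PySem.List.enumerate xs 0).map (fun p => if f p.1 then PySem.Str.strip p.2 else p.2)

theorem pvDropWhile_idem {α : Type} (p : α → Bool) (l : List α) :
    List.dropWhile p (List.dropWhile p l) = List.dropWhile p l := by
  induction l with
  | nil => simp
  | cons a l ih =>
    by_cases h : p a
    · simp [h, ih]
    · simp [h]

theorem pvDropWhile_prefix {α : Type} (p : α → Bool) (t u : List α)
    (ht : List.dropWhile p t = t) (hu : u <+: t) :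
    List.dropWhile p u = u := by
  cases u with
  | nil => simp
  | cons a u' =>
    obtain ⟨r, hr⟩ := hu
    subst hr
    by_cases h : p a
    · exfalso
      rw [List.cons_append, List.dropWhile_cons, if_pos h] at ht
      have h1 := List.length_dropWhile_le p (u' ++ r)
      have h2 := congrArg List.length ht
      simp at h1 h2
      omega
    · simp [h]

theorem pvChars_strip_idem (s : List Char) :
    PySem.Chars.strip (PySem.Chars.strip s) = PySem.Chars.strip s := by
  unfold PySem.Chars.strip PySem.Chars.rstrip PySem.Chars.lstrip
  set p := PySem.Chars.isspace
  set t := List.dropWhile p s with ht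
  have htt : List.dropWhile p t = t := pvDropWhile_idem p s
  -- the rstrip of t is a prefix of t, hence lstrip leaves it unchanged
  have hpre : (List.dropWhile p t.reverse).reverse <+: t := by
    have hsuf : List.dropWhile p t.reverse <:+ t.reverse := List.dropWhile_suffix p
    have h2 : (List.dropWhile p t.reverse).reverse <+: t.reverse.reverse :=
      List.reverse_prefix.mpr (by simpa using hsuf)
    simpa using h2
  have hl : List.dropWhile p (List.dropWhile p t.reverse).reverse
      = (List.dropWhile p t.reverse).reverse := pvDropWhile_prefix p t _ htt hpre
  rw [hl]
  simp [pvDropWhile_idem]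

theorem pvStr_strip_idem (s : String) :
    PySem.Str.strip (PySem.Str.strip s) = PySem.Str.strip s := by
  have h : (PySem.Str.strip (PySem.Str.strip s)).toList = (PySem.Str.strip s).toList := by
    simp [PySem.Str.toList_strip, pvChars_strip_idem]
  exact String.toList_inj.mp h

theorem pvEnumerate_getElem? {α : Type} (xs : List α) (s : Int) (k : Nat) :
    (PySem.List.enumerate xs s)[k]? = xs[k]?.map (fun x => (s + (k : Int), x)) := by
  induction xs generalizing s k with
  | nil => simp [PySem.List.enumerate_nil]
  | cons a xs ih =>
    cases k with
    | zero => simp [PySem.List.enumerate_cons]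
    | succ k =>
      cases h : xs[k]?
      · simp [PySem.List.enumerate_cons, ih, h]
      · simp [PySem.List.enumerate_cons, ih, h]
        omega

theorem pvMark_getElem? (f : Int → Bool) (xs : List String) (k : Nat) :
    (pvMark f xs)[k]? = xs[k]?.map (fun s => if f (k : Int) then PySem.Str.strip s else s) := by
  simp only [pvMark, List.getElem?_map, pvEnumerate_getElem?]
  cases xs[k]? <;> simp

theorem pvLen_mark (f : Int → Bool) (xs : List String) :
    (pvMark f xs).length = xs.length := by
  simp [pvMark, PySem.List.length_enumerate]

theorem pvMark_false (xs : List String) : pvMark (fun _ => false) xs = xs := by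
  simp [pvMark]

theorem pvStepA_mark (f : Int → Bool) (xs : List String) (index : Int) :
    pvStepA (pvMark f xs) index = pvMark (fun i => f i || (i == index)) xs := by
  unfold pvStepA
  by_cases h : 0 ≤ index ∧ index < PySem.List.len (pvMark f xs)
  · rw [if_pos h]
    have hlen : (pvMark f xs).length = xs.length := pvLen_mark f xs
    have hidx : index = ((index.toNat : Nat) : Int) := by omega
    have hlt : index.toNat < xs.length := by
      have := h.2; simp [PySem.List.len, hlen] at this; omega
    apply List.ext_getElem?
    intro k
    rw [PySem.List.pySetD_of_nonneg _ _ h.1]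
    by_cases hk : k = index.toNat
    · subst hk
      rw [List.getElem?_set_self (by rw [hlen]; exact hlt)]
      rw [pvMark_getElem?]
      have hget : PySem.List.pyGetD (pvMark f xs) index "" =
          if f (index.toNat : Int) then PySem.Str.strip (xs[index.toNat]'hlt) else xs[index.toNat]'hlt := by
        rw [PySem.List.pyGetD_of_nonneg _ _ h.1]
        have : (pvMark f xs)[index.toNat]? = some (if f (index.toNat : Int) then PySem.Str.strip (xs[index.toNat]'hlt) else xs[index.toNat]'hlt) := by
          rw [pvMark_getElem?]
          simp [List.getElem?_eq_getElem hlt]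
        simp [List.getD, this]
      rw [hget]
      have hbeq : ((index.toNat : Int) == index) = true := by
        simp [← hidx]
      rw [List.getElem?_eq_getElem hlt]
      simp only [Option.map_some, hbeq, Bool.or_true, if_true]
      congr 1
      by_cases hf : f ((index.toNat : Nat) : Int) = true
      · rw [if_pos hf, pvStr_strip_idem]
      · rw [if_neg hf]
    · rw [List.getElem?_set_ne (by omega)]
      rw [pvMark_getElem?, pvMark_getElem?]
      have hbeq : (((k : Nat) : Int) == index) = false := by
        simp; omega
      simp [hbeq]
  · rw [if_neg h]
    have hh : index < 0 ∨ (xs.length : Int) ≤ index := by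
      by_contra hc
      rw [not_or, not_lt, not_le] at hc
      exact h ⟨hc.1, by simp [PySem.List.len, pvLen_mark]; omega⟩
    apply List.ext_getElem?
    intro k
    rw [pvMark_getElem?, pvMark_getElem?]
    by_cases hk : k < xs.length
    · have hbeq : (((k : Nat) : Int) == index) = false := by
        simp
        omega
      simp [hbeq]
    · have hnone : xs[k]? = none := by
        rw [List.getElem?_eq_none_iff]
        omega
      simp [hnone]

theorem pvFoldl_mark (idxs : List Int) (xs : List String) (f : Int → Bool) :
    idxs.foldl pvStepA (pvMark f xs) = pvMark (fun i => f i || idxs.contains i) xs := by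
  induction idxs generalizing f with
  | nil => simp
  | cons x idxs ih =>
    simp only [List.foldl_cons, pvStepA_mark, ih]
    congr 1
    funext i
    by_cases hix : i = x
    · simp [hix]
    · have hb : (i == x) = false := beq_eq_false_iff_ne.mpr hix
      simp [hb, hix]

-- ===== VERDICT (by name: the statement is the Claim_ definition above) =====
theorem strip_specific_indices_spec : Claim_equal_strip_specific_indices := by
  intro strings indices _
  unfold Spec_strip_specific_indices strip_specific_indices strip_specific_indices_alt
  cases indices with
  | none => rfl
  | some idxs =>
    show idxs.foldl pvStepA strings
        = pvMark (fun i => PySem.Set.contains (PySem.Set.ofList idxs) i) strings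
    have hA : idxs.foldl pvStepA strings = pvMark (fun i => false || idxs.contains i) strings := by
      conv_lhs => rw [← pvMark_false strings]
      exact pvFoldl_mark idxs strings _
    rw [hA]
    congr 1
    funext i
    simp [PySem.Set.contains]
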